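-- pv_equiv track=rewrite | github.com/DNA-origamicon/NADOC | backend/core/overhang_generator.py | _has_dimer
-- ===== SOURCE A (Python) =====
-- _COMPLEMENT = str.maketrans("ACGTacgt", "TGCAtgca")
--
-- def reverse_complement(seq: str) -> str:
--     return seq.translate(_COMPLEMENT)[::-1]
--
-- def _has_dimer(seq: str, max_dimers: int = 1) -> bool:
--     """Return True if self-dimer count exceeds *max_dimers*.
--
--     Self-dimer: a suffix of length k is the reverse complement of a prefix
--     of the same length (k in 4..len(seq)-1).
--     """
--     count = 0
--     for k in range(4, len(seq)):
--         if seq[-k:] == reverse_complement(seq[:k]):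
--             count += 1
--             if count > max_dimers:
--                 return True
--     return False
-- ===== SOURCE B (Python) =====
-- _COMPLEMENT = str.maketrans("ACGTacgt", "TGCAtgca")
--
-- def reverse_complement(seq: str) -> str:
--     return seq.translate(_COMPLEMENT)[::-1]
--
-- def _has_dimer(seq: str, max_dimers: int = 1) -> bool:
--     """A suffix of length k matches a prefix's reverse complement exactly when
--     k <= the longest common suffix of seq and reverse_complement(seq); count
--     the k in 4..len(seq)-1 in closed form instead of comparing slices."""
--     rc = reverse_complement(seq)
--     L = 0
--     for x, y in zip(reversed(seq), reversed(rc)):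
--         if x != y:
--             break
--         L += 1
--     count = max(0, min(L, len(seq) - 1) - 3)
--     return count > max(max_dimers, 0)
-- ===== Notes on version B (the rewrite author's own statement) =====
-- stated objective: faster
-- what changed: Instead of comparing, for every k, the length-k suffix against the reverse complement of the length-k prefix (a fresh slice+translate+reverse per k), B computes reverse_complement(seq) once, finds the longest common suffix L of seq and it in one backward scan, and gets the dimer count in closed form as max(0, min(L, len-1) - 3).
import Mathlib
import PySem

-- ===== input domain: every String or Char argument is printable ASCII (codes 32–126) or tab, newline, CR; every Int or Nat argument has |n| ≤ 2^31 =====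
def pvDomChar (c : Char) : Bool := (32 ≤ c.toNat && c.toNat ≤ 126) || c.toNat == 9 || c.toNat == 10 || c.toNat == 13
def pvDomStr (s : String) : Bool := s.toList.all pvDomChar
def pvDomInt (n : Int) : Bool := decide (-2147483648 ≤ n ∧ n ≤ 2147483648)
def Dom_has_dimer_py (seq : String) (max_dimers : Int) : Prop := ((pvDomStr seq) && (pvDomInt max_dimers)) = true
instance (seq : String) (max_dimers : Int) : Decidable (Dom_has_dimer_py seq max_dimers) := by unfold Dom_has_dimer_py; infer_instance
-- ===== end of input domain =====

-- B replaces A's O(n^2) per-k slice comparison by one longest-common-suffix scan of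
-- seq against reverse_complement(seq) and a closed-form count (objective: faster).

-- ===== PORT A =====

-- str.translate(_COMPLEMENT): per-character map, identity outside "ACGTacgt" (exact)
def pvComp (c : Char) : Char :=
  if c = 'A' then 'T' else if c = 'C' then 'G'
  else if c = 'G' then 'C' else if c = 'T' then 'A'
  else if c = 'a' then 't' else if c = 'c' then 'g'
  else if c = 'g' then 'c' else if c = 't' then 'a' else c

-- reverse_complement: seq.translate(_COMPLEMENT)[::-1]
def pvRC (cs : List Char) : List Char := (cs.map pvComp).reverse

-- the 'for k in range(4, len(seq))' loop with early return
def pvALoop (cs : List Char) (max_dimers : Int) : List Int → Int → Bool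
  | [], _ => false
  | k :: rest, count =>
    if PySem.List.slice cs (some (-k)) none = pvRC (PySem.List.slice cs none (some k)) then
      if count + 1 > max_dimers then true
      else pvALoop cs max_dimers rest (count + 1)
    else pvALoop cs max_dimers rest count

def has_dimer_py (seq : String) (max_dimers : Int) : Bool :=
  let cs := seq.toList
  pvALoop cs max_dimers (PySem.List.pyRange 4 (cs.length : Int) 1) 0

-- ===== PORT B =====

-- the zip(reversed(seq), reversed(rc)) loop: common prefix length of the two reversals
def pvCPL : List Char → List Char → Nat
  | x :: xs, y :: ys => if x = y then pvCPL xs ys + 1 else 0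
  | _, _ => 0

def has_dimer_py_alt (seq : String) (max_dimers : Int) : Bool :=
  let cs := seq.toList
  let rc := pvRC cs
  let L : Int := (pvCPL cs.reverse rc.reverse : Int)
  let count := max 0 (min L ((cs.length : Int) - 1) - 3)
  count > max max_dimers 0

-- ===== PRECONDITION & SPEC =====
def Spec_has_dimer_py (seq : String) (max_dimers : Int) (out : Bool) : Prop := out = has_dimer_py_alt seq max_dimers
instance (seq : String) (max_dimers : Int) (out : Bool) : Decidable (Spec_has_dimer_py seq max_dimers out) := by unfold Spec_has_dimer_py; infer_instance

-- ===== CLAIM (what is proved, stated in full; the proofs are below) =====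
def Claim_equal_has_dimer_py : Prop := ∀ (seq : String) (max_dimers : Int), Dom_has_dimer_py seq max_dimers → Spec_has_dimer_py seq max_dimers (has_dimer_py seq max_dimers)

-- ===== LEMMAS AND PROOFS =====

-- A's per-k slice test, as a named predicate
def pvCond (cs : List Char) (k : Int) : Bool :=
  decide (PySem.List.slice cs (some (-k)) none = pvRC (PySem.List.slice cs none (some k)))

-- take m a = take m b exactly characterises m <= common-prefix length (for m within a)
theorem pvCPL_le_iff (a b : List Char) (m : Nat) (hm : m ≤ a.length) :
    (a.take m = b.take m ↔ m ≤ pvCPL a b) := by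
  induction a generalizing b m with
  | nil => simp_all [pvCPL]
  | cons x xs ih =>
    cases b with
    | nil =>
      cases m with
      | zero => simp [pvCPL]
      | succ m => simp [pvCPL]
    | cons y ys =>
      cases m with
      | zero => simp
      | succ m =>
        simp only [List.take_succ_cons, List.cons.injEq, pvCPL]
        have hih := ih ys m (by simpa using hm)
        by_cases hxy : x = y
        · simp [hxy, hih]
        · simp [hxy]

-- pvCPL is bounded by the first list's length
theorem pvCPL_le_length (a b : List Char) : pvCPL a b ≤ a.length := by
  induction a generalizing b with
  | nil => simp [pvCPL]
  | cons x xs ih =>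
    cases b with
    | nil => simp [pvCPL]
    | cons y ys =>
      simp only [pvCPL, List.length_cons]
      split
      · have := ih ys; omega
      · omega

-- A's slice test, for 4 <= k < n, is 'k <= L'
theorem pvCond_iff (cs : List Char) (k : Int) (h4 : 4 ≤ k) (hk : k < (cs.length : Int)) :
    (pvCond cs k = true ↔ k ≤ (pvCPL cs.reverse (cs.map pvComp) : Int)) := by
  obtain ⟨m, rfl⟩ : ∃ m : Nat, k = (m : Int) := ⟨k.toNat, by omega⟩
  unfold pvCond
  rw [decide_eq_true_eq,
      PySem.List.slice_from_neg_natCast cs m (by omega),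
      PySem.List.slice_to cs (by omega : (0:Int) ≤ (m : Int))]
  have hdrop : cs.drop (cs.length - m) = (cs.reverse.take m).reverse := by
    rw [List.reverse_take, List.reverse_reverse, List.length_reverse]
  unfold pvRC
  rw [hdrop, Int.toNat_natCast, List.reverse_inj, List.map_take,
      pvCPL_le_iff cs.reverse (cs.map pvComp) m (by simp; omega)]
  omega
-- loop semantics: A's early-return loop over ks returns true iff the number of
-- passing k's pushes count past max_dimers (and at least one k passes)
theorem pvALoop_iff (cs : List Char) (m : Int) (ks : List Int) (count : Int) :
    (pvALoop cs m ks count = true ↔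
      (count + (ks.countP (pvCond cs) : Int) > m ∧ 1 ≤ ks.countP (pvCond cs))) := by
  induction ks generalizing count with
  | nil => simp [pvALoop]
  | cons k rest ih =>
    simp only [pvALoop, List.countP_cons]
    by_cases hc : PySem.List.slice cs (some (-k)) none = pvRC (PySem.List.slice cs none (some k))
    · have hone : (if pvCond cs k = true then 1 else 0) = 1 := by simp [pvCond, hc]
      rw [if_pos hc, hone]
      by_cases hcnt : count + 1 > m
      · rw [if_pos hcnt]
        refine ⟨fun _ => ⟨?_, ?_⟩, fun _ => rfl⟩ <;> omega
      · rw [if_neg hcnt, ih (count + 1)]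
        constructor <;> intro h <;> constructor <;> omega
    · have hzero : (if pvCond cs k = true then 1 else 0) = 0 := by simp [pvCond, hc]
      rw [if_neg hc, hzero, ih count]
      omega

-- counting k in [a,b) with k <= L in closed form
theorem pvCount_range (a b L : Int) :
    ((PySem.List.pyRange a b 1).countP (fun k => decide (k ≤ L)))
      = (min b (L + 1) - a).toNat := by
  by_cases hab : b ≤ a
  · rw [PySem.List.pyRange_one_eq_nil hab]
    simp; omega
  · rw [PySem.List.pyRange_one_cons (by omega), List.countP_cons, pvCount_range (a + 1) b L]
    by_cases hL : a ≤ L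
    · simp [hL]; omega
    · simp [hL]; omega
termination_by (b - a).toNat
decreasing_by omega

-- ===== VERDICT (by name: the statement is the Claim_ definition above) =====
theorem has_dimer_py_spec : Claim_equal_has_dimer_py := by
  intro seq max_dimers _
  unfold Spec_has_dimer_py has_dimer_py has_dimer_py_alt
  simp only [pvRC, List.reverse_reverse]
  set cs := seq.toList with hcs
  set L : Nat := pvCPL cs.reverse (cs.map pvComp) with hL
  have hloop := pvALoop_iff cs max_dimers (PySem.List.pyRange 4 (cs.length : Int) 1) 0
  have hcong : (PySem.List.pyRange 4 (cs.length : Int) 1).countP (pvCond cs)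
      = (PySem.List.pyRange 4 (cs.length : Int) 1).countP (fun k => decide (k ≤ (L : Int))) := by
    refine List.countP_congr (fun k hk => ?_)
    have hmem := (PySem.List.mem_pyRange_one).mp hk
    rw [pvCond_iff cs k hmem.1 hmem.2, decide_eq_true_eq]
  rw [hcong, pvCount_range 4 (cs.length : Int) (L : Int)] at hloop
  have hLlen : L ≤ cs.length := by
    have := pvCPL_le_length cs.reverse (cs.map pvComp)
    simpa using this
  by_cases hres : pvALoop cs max_dimers (PySem.List.pyRange 4 (cs.length : Int) 1) 0 = true
  · rw [hres]
    have h := hloop.mp hres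
    symm
    rw [decide_eq_true_eq]
    omega
  · rw [Bool.not_eq_true] at hres
    rw [hres]
    symm
    rw [decide_eq_false_iff_not]
    intro hgt
    have : pvALoop cs max_dimers (PySem.List.pyRange 4 (cs.length : Int) 1) 0 = true := by
      rw [hloop]
      constructor <;> omega
    rw [hres] at this
    exact Bool.false_ne_true this
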